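-- pv_equiv track=rewrite | github.com/ACNH-app/acnh-diary | app/services/home_summary.py | blooming_shrubs_now
-- ===== SOURCE A (Python) =====
-- def blooming_shrubs_now(month: int, hemisphere: str) -> list[str]:
--     north = {
--         "동백나무": {1, 2, 3, 12},
--         "철쭉": {4, 5},
--         "수국": {6, 7},
--         "무궁화": {7, 8, 9},
--         "플루메리아": {6, 7, 8, 9},
--         "올리브": {9, 10},
--     }
--     south = {
--         "동백나무": {6, 7, 8, 9},
--         "철쭉": {10, 11},
--         "수국": {12, 1},
--         "무궁화": {1, 2, 3},
--         "플루메리아": {12, 1, 2, 3},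
--         "올리브": {3, 4},
--     }
--     src = south if hemisphere == "south" else north
--     return [name for name, months in src.items() if month in months]
-- ===== SOURCE B (Python) =====
-- # B: the shrub->months data is fixed, so precompute the inverted month->shrubs
-- # table once as a literal and answer by a single dict lookup with [] default.
-- _NORTH_BY_MONTH = {
--     1: ["동백나무"],
--     2: ["동백나무"],
--     3: ["동백나무"],
--     4: ["철쭉"],
--     5: ["철쭉"],
--     6: ["수국", "플루메리아"],
--     7: ["수국", "무궁화", "플루메리아"],
--     8: ["무궁화", "플루메리아"],
--     9: ["무궁화", "플루메리아", "올리브"],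
--     10: ["올리브"],
--     12: ["동백나무"],
-- }
-- _SOUTH_BY_MONTH = {
--     1: ["수국", "무궁화", "플루메리아"],
--     2: ["무궁화", "플루메리아"],
--     3: ["무궁화", "플루메리아", "올리브"],
--     4: ["올리브"],
--     6: ["동백나무"],
--     7: ["동백나무"],
--     8: ["동백나무"],
--     9: ["동백나무"],
--     10: ["철쭉"],
--     11: ["철쭉"],
--     12: ["수국", "플루메리아"],
-- }
--
-- def blooming_shrubs_now(month: int, hemisphere: str) -> list[str]:
--     table = _SOUTH_BY_MONTH if hemisphere == "south" else _NORTH_BY_MONTH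
--     return list(table.get(month, []))
-- ===== Notes on version B (the rewrite author's own statement) =====
-- stated objective: idiomatic
-- what changed: B replaces A's per-call scan of the shrub->bloom-months dict (membership test per shrub) with a precomputed literal month->shrub-names inverted table and a single dict lookup with [] default.
import Mathlib
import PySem

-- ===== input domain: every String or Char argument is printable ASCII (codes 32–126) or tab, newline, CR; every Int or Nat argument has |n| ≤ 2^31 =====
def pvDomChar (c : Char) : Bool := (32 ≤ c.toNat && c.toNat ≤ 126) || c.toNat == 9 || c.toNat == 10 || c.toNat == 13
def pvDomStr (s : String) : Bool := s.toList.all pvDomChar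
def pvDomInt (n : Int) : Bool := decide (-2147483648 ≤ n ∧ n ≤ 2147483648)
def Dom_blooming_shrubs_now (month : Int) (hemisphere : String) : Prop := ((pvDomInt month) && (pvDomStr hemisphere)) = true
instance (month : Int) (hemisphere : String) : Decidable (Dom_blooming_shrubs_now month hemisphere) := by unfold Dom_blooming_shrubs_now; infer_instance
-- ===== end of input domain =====

-- B replaces A's per-call filter over the shrub→months tables by a precomputed inverted
-- month→shrub-names literal table and one lookup with [] default (objective: idiomatic).

-- ===== PORT A =====
-- shrub → bloom-months tables (Python dicts as assoc lists in insertion order, sets as PySem.Set)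
def pvNorth : List (String × PySem.Set Int) :=
  [("동백나무", PySem.Set.ofList [1, 2, 3, 12]),
   ("철쭉", PySem.Set.ofList [4, 5]),
   ("수국", PySem.Set.ofList [6, 7]),
   ("무궁화", PySem.Set.ofList [7, 8, 9]),
   ("플루메리아", PySem.Set.ofList [6, 7, 8, 9]),
   ("올리브", PySem.Set.ofList [9, 10])]

def pvSouth : List (String × PySem.Set Int) :=
  [("동백나무", PySem.Set.ofList [6, 7, 8, 9]),
   ("철쭉", PySem.Set.ofList [10, 11]),
   ("수국", PySem.Set.ofList [12, 1]),
   ("무궁화", PySem.Set.ofList [1, 2, 3]),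
   ("플루메리아", PySem.Set.ofList [12, 1, 2, 3]),
   ("올리브", PySem.Set.ofList [3, 4])]

def blooming_shrubs_now (month : Int) (hemisphere : String) : List String :=
  let src := if hemisphere == "south" then pvSouth else pvNorth
  (src.filter (fun p => p.2.contains month)).map (fun p => p.1)

-- ===== PORT B =====
-- precomputed inverted literal tables month → shrub names (Source B's _NORTH_BY_MONTH/_SOUTH_BY_MONTH)
def pvNorthByMonth : PySem.Dict Int (List String) := PySem.Dict.ofList
  [(1, ["동백나무"]), (2, ["동백나무"]), (3, ["동백나무"]),
   (4, ["철쭉"]), (5, ["철쭉"]),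
   (6, ["수국", "플루메리아"]),
   (7, ["수국", "무궁화", "플루메리아"]),
   (8, ["무궁화", "플루메리아"]),
   (9, ["무궁화", "플루메리아", "올리브"]),
   (10, ["올리브"]), (12, ["동백나무"])]

def pvSouthByMonth : PySem.Dict Int (List String) := PySem.Dict.ofList
  [(1, ["수국", "무궁화", "플루메리아"]),
   (2, ["무궁화", "플루메리아"]),
   (3, ["무궁화", "플루메리아", "올리브"]),
   (4, ["올리브"]),
   (6, ["동백나무"]), (7, ["동백나무"]), (8, ["동백나무"]), (9, ["동백나무"]),
   (10, ["철쭉"]), (11, ["철쭉"]),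
   (12, ["수국", "플루메리아"])]

def blooming_shrubs_now_alt (month : Int) (hemisphere : String) : List String :=
  let table := if hemisphere == "south" then pvSouthByMonth else pvNorthByMonth
  table.getD month []

-- ===== PRECONDITION & SPEC =====
def Spec_blooming_shrubs_now (month : Int) (hemisphere : String) (out : List String) : Prop := out = blooming_shrubs_now_alt month hemisphere
instance (month : Int) (hemisphere : String) (out : List String) : Decidable (Spec_blooming_shrubs_now month hemisphere out) := by unfold Spec_blooming_shrubs_now; infer_instance

-- ===== CLAIM (what is proved, stated in full; the proofs are below) =====
def Claim_equal_blooming_shrubs_now : Prop := ∀ (month : Int) (hemisphere : String), Dom_blooming_shrubs_now month hemisphere → Spec_blooming_shrubs_now month hemisphere (blooming_shrubs_now month hemisphere)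

-- ===== LEMMAS AND PROOFS =====

-- the two computations agree on every month for both table pairs
lemma pv_table_eq (src : List (String × PySem.Set Int)) (tbl : PySem.Dict Int (List String))
    (hsrc : (src = pvNorth ∧ tbl = pvNorthByMonth) ∨ (src = pvSouth ∧ tbl = pvSouthByMonth))
    (m : Int) :
    (src.filter (fun p => p.2.contains m)).map (fun p => p.1) = tbl.getD m [] := by
  by_cases h1 : m = 1; · subst h1; rcases hsrc with ⟨h, h'⟩ | ⟨h, h'⟩ <;> subst h <;> subst h' <;> decide
  by_cases h2 : m = 2; · subst h2; rcases hsrc with ⟨h, h'⟩ | ⟨h, h'⟩ <;> subst h <;> subst h' <;> decide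
  by_cases h3 : m = 3; · subst h3; rcases hsrc with ⟨h, h'⟩ | ⟨h, h'⟩ <;> subst h <;> subst h' <;> decide
  by_cases h4 : m = 4; · subst h4; rcases hsrc with ⟨h, h'⟩ | ⟨h, h'⟩ <;> subst h <;> subst h' <;> decide
  by_cases h5 : m = 5; · subst h5; rcases hsrc with ⟨h, h'⟩ | ⟨h, h'⟩ <;> subst h <;> subst h' <;> decide
  by_cases h6 : m = 6; · subst h6; rcases hsrc with ⟨h, h'⟩ | ⟨h, h'⟩ <;> subst h <;> subst h' <;> decide
  by_cases h7 : m = 7; · subst h7; rcases hsrc with ⟨h, h'⟩ | ⟨h, h'⟩ <;> subst h <;> subst h' <;> decide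
  by_cases h8 : m = 8; · subst h8; rcases hsrc with ⟨h, h'⟩ | ⟨h, h'⟩ <;> subst h <;> subst h' <;> decide
  by_cases h9 : m = 9; · subst h9; rcases hsrc with ⟨h, h'⟩ | ⟨h, h'⟩ <;> subst h <;> subst h' <;> decide
  by_cases h10 : m = 10; · subst h10; rcases hsrc with ⟨h, h'⟩ | ⟨h, h'⟩ <;> subst h <;> subst h' <;> decide
  by_cases h11 : m = 11; · subst h11; rcases hsrc with ⟨h, h'⟩ | ⟨h, h'⟩ <;> subst h <;> subst h' <;> decide
  by_cases h12 : m = 12; · subst h12; rcases hsrc with ⟨h, h'⟩ | ⟨h, h'⟩ <;> subst h <;> subst h' <;> decide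
  have e1 : ((1 : Int) == m) = false := by simp [Ne.symm h1]
  have e2 : ((2 : Int) == m) = false := by simp [Ne.symm h2]
  have e3 : ((3 : Int) == m) = false := by simp [Ne.symm h3]
  have e4 : ((4 : Int) == m) = false := by simp [Ne.symm h4]
  have e5 : ((5 : Int) == m) = false := by simp [Ne.symm h5]
  have e6 : ((6 : Int) == m) = false := by simp [Ne.symm h6]
  have e7 : ((7 : Int) == m) = false := by simp [Ne.symm h7]
  have e8 : ((8 : Int) == m) = false := by simp [Ne.symm h8]
  have e9 : ((9 : Int) == m) = false := by simp [Ne.symm h9]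
  have e10 : ((10 : Int) == m) = false := by simp [Ne.symm h10]
  have e11 : ((11 : Int) == m) = false := by simp [Ne.symm h11]
  have e12 : ((12 : Int) == m) = false := by simp [Ne.symm h12]
  rcases hsrc with ⟨h, h'⟩ | ⟨h, h'⟩ <;> subst h <;> subst h' <;>
    simp [pvNorth, pvSouth, pvNorthByMonth, pvSouthByMonth, PySem.Set.ofList,
      PySem.Set.contains, PySem.Dict.getD, PySem.Dict.get?, PySem.Dict.ofList, PySem.Dict.items, PySem.Dict.update, PySem.Dict.insert, PySem.Dict.contains, PySem.Dict.empty, List.find?, List.filter,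
      h1, h2, h3, h4, h5, h6, h7, h8, h9, h10, h11, h12,
      e1, e2, e3, e4, e5, e6, e7, e8, e9, e10, e11, e12]

-- ===== VERDICT (by name: the statement is the Claim_ definition above) =====
theorem blooming_shrubs_now_spec : Claim_equal_blooming_shrubs_now := by
  intro month hemisphere _
  unfold Spec_blooming_shrubs_now blooming_shrubs_now blooming_shrubs_now_alt
  by_cases hs : hemisphere == "south" <;> simp only [hs, if_pos, Bool.false_eq_true, ite_false]
  · exact pv_table_eq pvSouth pvSouthByMonth (Or.inr ⟨rfl, rfl⟩) month
  · exact pv_table_eq pvNorth pvNorthByMonth (Or.inl ⟨rfl, rfl⟩) month
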